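-- pv_equiv track=rewrite | github.com/Phongsathron/keystroke_nn | secure/test.py | generate
-- ===== SOURCE A (Python) =====
-- def generate(list1,list2):
--     """generate prob word"""
--     output = []
--     specChar = [';', '"', "'", '/', '\\', '[', ']', ',','.',':']
--
--     ##################################### define value #####################################
--
--     for i in list1:
--         if(i not in specChar):
--             for j in list2:
--                 if(j not in specChar):
--                     output.append(i+j)
--
--     return output
-- ===== SOURCE B (Python) =====
-- def generate(list1, list2):
--     """generate prob word"""
--     spec = {';', '"', "'", '/', '\\', '[', ']', ',', '.', ':'}
--     f1 = [i for i in list1 if i not in spec]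
--     f2 = [j for j in list2 if j not in spec]
--     m = len(f2)
--     return [f1[k // m] + f2[k % m] for k in range(len(f1) * m)]
-- ===== Notes on version B (the rewrite author's own statement) =====
-- stated objective: alternative
-- what changed: B filters each list once, then replaces the nested loops by a single flat loop over one index k in range(len(f1)*len(f2)), recovering each pair by divmod index arithmetic (f1[k//m] + f2[k%m]).
import Mathlib
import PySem

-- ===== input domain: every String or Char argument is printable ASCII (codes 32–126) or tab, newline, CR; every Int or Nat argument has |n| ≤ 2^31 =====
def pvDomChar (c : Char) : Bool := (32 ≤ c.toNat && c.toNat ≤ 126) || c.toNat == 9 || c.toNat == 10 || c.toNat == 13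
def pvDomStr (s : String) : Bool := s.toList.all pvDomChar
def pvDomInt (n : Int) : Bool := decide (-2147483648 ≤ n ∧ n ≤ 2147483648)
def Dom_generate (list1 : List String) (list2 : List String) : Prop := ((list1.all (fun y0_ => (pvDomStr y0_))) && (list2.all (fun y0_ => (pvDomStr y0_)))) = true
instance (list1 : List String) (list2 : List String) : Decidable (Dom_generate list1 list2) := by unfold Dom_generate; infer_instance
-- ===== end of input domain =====

-- B filters both lists once, then produces the pairs by a single flat indexed loop with divmod arithmetic instead of nested loops; alternative decomposition, same results.


-- ===== PORT A =====
def specCharA : List String := [";", "\"", "'", "/", "\\", "[", "]", ",", ".", ":"]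

-- literal transliteration: nested loops, membership tested per element inside the loops
def generate (list1 : List String) (list2 : List String) : List String :=
  list1.foldl
    (fun output i =>
      if !specCharA.contains i then
        list2.foldl
          (fun output j =>
            if !specCharA.contains j then output ++ [i ++ j] else output)
          output
      else output)
    []

-- ===== PORT B =====
def specSetB : PySem.Set String := PySem.Set.ofList [";", "\"", "'", "/", "\\", "[", "]", ",", ".", ":"]

-- B: filter each list once, then one flat loop over k in range(len(f1)*m) with divmod indexing
def generate_alt (list1 : List String) (list2 : List String) : List String :=
  let f1 := list1.filter (fun i => !(specSetB.contains i))
  let f2 := list2.filter (fun j => !(specSetB.contains j))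
  let m : Int := f2.length
  (PySem.List.pyRange 0 ((f1.length : Int) * m) 1).map
    (fun k => PySem.List.pyGetD f1 (PySem.Int.floordiv k m) "" ++
              PySem.List.pyGetD f2 (PySem.Int.mod k m) "")

-- ===== PRECONDITION & SPEC =====
def Spec_generate (list1 : List String) (list2 : List String) (out : List String) : Prop := out = generate_alt list1 list2
instance (list1 : List String) (list2 : List String) (out : List String) : Decidable (Spec_generate list1 list2 out) := by unfold Spec_generate; infer_instance

-- ===== CLAIM =====
def Claim_equal_generate : Prop := ∀ (list1 : List String) (list2 : List String), Dom_generate list1 list2 → Spec_generate list1 list2 (generate list1 list2)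

-- ===== LEMMAS AND PROOFS =====

-- the two membership tests agree
theorem specContains_eq (s : String) : specSetB.contains s = specCharA.contains s := by
  simp [specSetB, specCharA, PySem.Set.ofList, PySem.Set.contains, PySem.Set.add]

-- A's nested loops, with the accumulator generalized, equal acc ++ filter-then-product
theorem generate_loop (list1 list2 : List String) (acc : List String) :
    list1.foldl
      (fun output i =>
        if !specCharA.contains i then
          list2.foldl
            (fun output j =>
              if !specCharA.contains j then output ++ [i ++ j] else output)
            output
        else output)
      acc
    = acc ++ (list1.filter (fun i => !specCharA.contains i)).flatMap
        (fun i => (list2.filter (fun j => !specCharA.contains j)).map (fun j => i ++ j)) := by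
  induction list1 generalizing acc with
  | nil => simp
  | cons i rest ih =>
      rw [List.foldl_cons, List.filter_cons]
      by_cases h : specCharA.contains i = true
      · simp only [h, Bool.not_true, Bool.false_eq_true, if_false, ih]
      · have h' : specCharA.contains i = false := by simpa using h
        simp only [h', Bool.not_false, if_true,
          PySem.List.foldl_append_if (fun j => !specCharA.contains j) (fun j => i ++ j),
          ih, List.flatMap_cons, List.append_assoc]

-- enumerating a list by getD over range of its length gives the list back
theorem range_map_getD (l : List String) :
    (List.range l.length).map (fun k => l.getD k "") = l := by
  apply List.ext_getElem
  · simp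
  · intro n h1 h2
    simp [List.getD_eq_getElem?_getD, List.getElem?_eq_getElem h2]

-- Nat-level form of B's flat divmod loop: it enumerates the Cartesian product in order
theorem flat_index_nat (xs ys : List String) :
    (List.range (xs.length * ys.length)).map
      (fun k => xs.getD (k / ys.length) "" ++ ys.getD (k % ys.length) "")
    = xs.flatMap (fun i => ys.map (fun j => i ++ j)) := by
  rcases ys with _ | ⟨y, ys'⟩
  · simp
  · set ys := (y :: ys') with hys
    have hm : 0 < ys.length := by simp [hys]
    induction xs with
    | nil => simp
    | cons i rest ih =>
        have hlen : (i :: rest).length * ys.length = ys.length + rest.length * ys.length := by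
          simp [Nat.succ_mul, Nat.add_comm]
        rw [hlen, List.range_add, List.map_append, List.map_map]
        congr 1
        · -- first block: k < ys.length, so k / m = 0 and k % m = k
          calc (List.range ys.length).map
                  (fun k => (i :: rest).getD (k / ys.length) "" ++ ys.getD (k % ys.length) "")
              = (List.range ys.length).map (fun k => i ++ ys.getD k "") := by
                apply List.map_congr_left
                intro k hk
                have hk' : k < ys.length := List.mem_range.mp hk
                rw [Nat.div_eq_of_lt hk', Nat.mod_eq_of_lt hk']
                rfl
            _ = ys.map (fun j => i ++ j) := by
                conv_rhs => rw [← range_map_getD ys]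
                rw [List.map_map]
                rfl
        · -- second block: (m + k) / m = k / m + 1 and (m + k) % m = k % m
          calc (List.range (rest.length * ys.length)).map
                  ((fun k => (i :: rest).getD (k / ys.length) "" ++ ys.getD (k % ys.length) "") ∘
                    (fun k => ys.length + k))
              = (List.range (rest.length * ys.length)).map
                  (fun k => rest.getD (k / ys.length) "" ++ ys.getD (k % ys.length) "") := by
                apply List.map_congr_left
                intro k _
                simp only [Function.comp]
                rw [Nat.add_comm ys.length k, Nat.add_div_right k hm, Nat.add_mod_right]
                rfl
            _ = rest.flatMap (fun i => ys.map (fun j => i ++ j)) := ih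

theorem generate_spec : Claim_equal_generate := by
  intro list1 list2 _
  unfold Spec_generate generate generate_alt
  rw [generate_loop, List.nil_append]
  simp only [specContains_eq]
  rw [← flat_index_nat]
  rw [← Nat.cast_mul, PySem.List.pyRange_zero_natCast, List.map_map]
  apply List.map_congr_left
  intro k _
  simp only [Function.comp, PySem.Int.floordiv_natCast, PySem.Int.mod_natCast,
    PySem.List.pyGetD_natCast]
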